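-- pv_equiv track=rewrite | github.com/MagiusCHE/bank-monitor | server/app/services/grouping.py | dewrap
-- ===== SOURCE A (Python) =====
-- _FINECO_WRAP_WIDTH = 40
--
-- def dewrap(text: str) -> str:
--     if not text:
--         return ""
--     chars = list(text)
--     for pos in range(_FINECO_WRAP_WIDTH, len(chars), _FINECO_WRAP_WIDTH):
--         if chars[pos] != " ":
--             continue
--         left = chars[pos - 1] if pos - 1 >= 0 else ""
--         right = chars[pos + 1] if pos + 1 < len(chars) else ""
--         if left.isalpha() and right.isalpha():
--             chars[pos] = ""
--     return "".join(chars)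
-- ===== SOURCE B (Python) =====
-- def dewrap(text: str) -> str:
--     n = len(text)
--     out = []
--     for i, ch in enumerate(text):
--         if (i and i % 40 == 0 and ch == " " and i + 1 < n
--                 and text[i - 1].isalpha() and text[i + 1].isalpha()):
--             continue
--         out.append(ch)
--     return "".join(out)
-- ===== Notes on version B (the rewrite author's own statement) =====
-- stated objective: simpler
-- what changed: Instead of materialising a mutable char list and looping over the 40-multiple boundary positions rewriting entries in place, B makes one filtering pass over the enumerated characters, skipping a character exactly when its index is a positive multiple of 40 and it is a space flanked by alphabetic neighbours.
import Mathlib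
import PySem

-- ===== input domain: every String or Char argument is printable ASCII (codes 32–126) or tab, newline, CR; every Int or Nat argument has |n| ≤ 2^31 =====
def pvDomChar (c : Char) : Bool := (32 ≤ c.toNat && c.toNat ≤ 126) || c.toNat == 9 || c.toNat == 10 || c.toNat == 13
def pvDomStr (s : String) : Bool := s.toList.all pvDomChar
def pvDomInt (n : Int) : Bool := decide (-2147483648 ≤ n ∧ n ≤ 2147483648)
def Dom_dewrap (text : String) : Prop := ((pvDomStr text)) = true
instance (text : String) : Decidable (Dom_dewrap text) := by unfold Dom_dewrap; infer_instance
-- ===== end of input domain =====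

-- B replaces A's in-place mutation of a char list at the 40-multiple boundary positions by a
-- single filtering pass over the enumerated characters (objective: simpler); return values only, no mutation.

-- ===== PORT A =====
-- one iteration of A's loop over the boundary positions (a Python 1-char string is a List Char)
def dewrapGo (cs : List (List Char)) (pos : Int) : List (List Char) :=
  if PySem.List.pyGetD cs pos [] ≠ [' '] then cs
  else
    let left : List Char := if pos - 1 ≥ 0 then PySem.List.pyGetD cs (pos - 1) [] else []
    let right : List Char := if pos + 1 < (cs.length : Int) then PySem.List.pyGetD cs (pos + 1) [] else []
    if PySem.Chars.strIsalpha left && PySem.Chars.strIsalpha right then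
      PySem.List.pySetD cs pos []
    else cs

def dewrap (text : String) : String :=
  if text = "" then ""
  else
    let chars : List (List Char) := text.toList.map (fun c => [c])
    String.ofList (((PySem.List.pyRange 40 (chars.length : Int) 40).foldl dewrapGo chars).flatten)

-- ===== PORT B =====
def dewrap_alt (text : String) : String :=
  let L := text.toList
  let n : Int := L.length
  String.ofList ((PySem.List.enumerate L 0).foldl
    (fun out ic =>
      if ic.1 ≠ 0 && PySem.Int.mod ic.1 40 == 0 && ic.2 == ' ' && decide (ic.1 + 1 < n)
          && PySem.Chars.isalpha (PySem.List.pyGetD L (ic.1 - 1) ' ')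
          && PySem.Chars.isalpha (PySem.List.pyGetD L (ic.1 + 1) ' ')
      then out else out ++ [ic.2]) [])

-- ===== PRECONDITION & SPEC =====
def Spec_dewrap (text : String) (out : String) : Prop := out = dewrap_alt text
instance (text : String) (out : String) : Decidable (Spec_dewrap text out) := by unfold Spec_dewrap; infer_instance

-- ===== CLAIM (what is proved, stated in full; the proofs are below) =====
def Claim_equal_dewrap : Prop := ∀ (text : String), Dom_dewrap text → Spec_dewrap text (dewrap text)

-- ===== LEMMAS AND PROOFS =====

-- the drop condition on the ORIGINAL character list, as a predicate on the index
def pvC (L : List Char) (j : Nat) : Bool :=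
  decide (j ≠ 0) && decide (j % 40 = 0) && (L.getD j ' ' == ' ') && decide (j + 1 < L.length)
    && PySem.Chars.isalpha (L.getD (j - 1) ' ') && PySem.Chars.isalpha (L.getD (j + 1) ' ')

theorem pv_length_go (cs : List (List Char)) (pos : Int) :
    (dewrapGo cs pos).length = cs.length := by
  unfold dewrapGo
  dsimp only
  split_ifs <;> simp [PySem.List.length_pySetD]

theorem pv_length_foldA (P : List Int) (cs : List (List Char)) :
    (P.foldl dewrapGo cs).length = cs.length := by
  induction P generalizing cs with
  | nil => rfl
  | cons p rest ih => simp [List.foldl_cons, ih, pv_length_go]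

-- a non-boundary read or an unprocessed boundary read in dewrapGo sees the original value
theorem pv_go_getD_ne (cs : List (List Char)) (pos : Int) (d : Nat)
    (hpos : 0 ≤ pos) (hd : (d : Int) ≠ pos) :
    (dewrapGo cs pos).getD d [] = cs.getD d [] := by
  unfold dewrapGo
  dsimp only
  split_ifs <;> try rfl
  all_goals
    rw [show pos = ((pos.toNat : Nat) : Int) by omega, PySem.List.pySetD_natCast]
    simp [List.getD_eq_getElem?_getD, List.getElem?_set_ne (by omega : pos.toNat ≠ d)]

-- value of dewrapGo at its own (in-range, multiple-of-40) position
theorem pv_go_getD_self (L : List Char) (cs : List (List Char)) (k : Nat)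
    (hlen : cs.length = L.length) (hlt : 40 * (k + 1) < L.length)
    (hread : ∀ d : Nat, d < L.length →
        (d = 40 * (k + 1) - 1 ∨ d = 40 * (k + 1) ∨ d = 40 * (k + 1) + 1) →
        cs.getD d [] = [L.getD d ' ']) :
    (dewrapGo cs ((40 * (k + 1) : Nat) : Int)).getD (40 * (k + 1)) [] =
      if pvC L (40 * (k + 1)) then [] else cs.getD (40 * (k + 1)) [] := by
  have h1 : PySem.List.pyGetD cs ((40 * (k + 1) : Nat) : Int) [] = [L.getD (40 * (k + 1)) ' '] := by
    rw [PySem.List.pyGetD_natCast]; exact hread _ (by omega) (by omega)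
  have h2 : PySem.List.pyGetD cs (((40 * (k + 1) : Nat) : Int) - 1) [] = [L.getD (40 * (k + 1) - 1) ' '] := by
    rw [show (((40 * (k + 1) : Nat) : Int) - 1) = ((40 * (k + 1) - 1 : Nat) : Int) by push_cast; omega,
        PySem.List.pyGetD_natCast]
    exact hread _ (by omega) (by omega)
  have h3 : 40 * (k + 1) + 1 < L.length →
      PySem.List.pyGetD cs (((40 * (k + 1) : Nat) : Int) + 1) [] = [L.getD (40 * (k + 1) + 1) ' '] := by
    intro hr
    rw [show (((40 * (k + 1) : Nat) : Int) + 1) = ((40 * (k + 1) + 1 : Nat) : Int) by omega,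
        PySem.List.pyGetD_natCast]
    exact hread _ hr (by omega)
  have hset : (PySem.List.pySetD cs ((40 * (k + 1) : Nat) : Int) []).getD (40 * (k + 1)) [] = ([] : List Char) := by
    rw [PySem.List.pySetD_natCast]
    simp [List.getD_eq_getElem?_getD, hlen, hlt]
  have h0 : ¬ (40 * (k + 1) = 0) := by omega
  have hmod : (40 * (k + 1)) % 40 = 0 := by omega
  have hsa : ∀ c : Char, PySem.Chars.strIsalpha [c] = PySem.Chars.isalpha c := by
    intro c; simp [PySem.Chars.strIsalpha]
  unfold dewrapGo
  dsimp only
  rw [h1, if_pos (show (((40 * (k + 1) : Nat) : Int) - 1) ≥ 0 by push_cast; omega), h2]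
  by_cases hr : 40 * (k + 1) + 1 < L.length
  · rw [if_pos (show (((40 * (k + 1) : Nat) : Int) + 1) < (cs.length : Int) by
        rw [hlen]; push_cast; omega), h3 hr, hsa, hsa]
    by_cases hsp : L.getD (40 * (k + 1)) ' ' = ' '
    · rw [if_neg (not_not_intro (by rw [hsp]))]
      by_cases ha1 : PySem.Chars.isalpha (L.getD (40 * (k + 1) - 1) ' ') = true
      · by_cases ha2 : PySem.Chars.isalpha (L.getD (40 * (k + 1) + 1) ' ') = true
        · have hc : pvC L (40 * (k + 1)) = true := by
            unfold pvC
            rw [hsp, ha1, ha2]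
            simp [h0, hmod, hr]
          rw [if_pos (by rw [ha1, ha2]; rfl), hc, if_pos rfl]
          exact hset
        · have hc : pvC L (40 * (k + 1)) = false := by
            unfold pvC
            rw [Bool.eq_false_iff]
            intro h
            exact ha2 ((Bool.and_eq_true _ _).mp h).2
          rw [if_neg (fun h => ha2 ((Bool.and_eq_true _ _).mp h).2), hc]
          simp
      · have hc : pvC L (40 * (k + 1)) = false := by
          unfold pvC
          rw [Bool.eq_false_iff]
          intro h
          exact ha1 ((Bool.and_eq_true _ _).mp ((Bool.and_eq_true _ _).mp h).1).2
        rw [if_neg (fun h => ha1 ((Bool.and_eq_true _ _).mp h).1), hc]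
        simp
    · rw [if_pos (fun h => hsp (by injection h))]
      have hc : pvC L (40 * (k + 1)) = false := by
        unfold pvC
        rw [Bool.eq_false_iff]
        intro h
        exact hsp (by
          have := ((Bool.and_eq_true _ _).mp
            ((Bool.and_eq_true _ _).mp ((Bool.and_eq_true _ _).mp ((Bool.and_eq_true _ _).mp h).1).1).1).2
          exact eq_of_beq this)
      rw [hc]
      simp
  · rw [if_neg (show ¬ ((((40 * (k + 1) : Nat) : Int) + 1) < (cs.length : Int)) by
        rw [hlen]; push_cast; omega)]
    have hc : pvC L (40 * (k + 1)) = false := by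
      unfold pvC
      rw [Bool.eq_false_iff]
      intro h
      exact hr (by
        have := ((Bool.and_eq_true _ _).mp ((Bool.and_eq_true _ _).mp ((Bool.and_eq_true _ _).mp h).1).1).2
        exact of_decide_eq_true this)
    rw [hc]
    by_cases hsp : L.getD (40 * (k + 1)) ' ' = ' '
    · rw [if_neg (not_not_intro (by rw [hsp])),
          if_neg (by simp [PySem.Chars.strIsalpha])]
      simp
    · rw [if_pos (fun h => hsp (by injection h))]
      simp

-- the main invariant for A's fold: pointwise description of the final char list
theorem pv_foldA (L : List Char) (P : List Int) (cs : List (List Char))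
    (hlen : cs.length = L.length)
    (hP : ∀ p ∈ P, ∃ k : Nat, p = ((40 * (k + 1) : Nat) : Int) ∧ 40 * (k + 1) < L.length)
    (hnd : P.Pairwise (· < ·))
    (hcs : ∀ p ∈ P, ∀ d : Nat, d < L.length →
        ((d : Int) = p - 1 ∨ (d : Int) = p ∨ (d : Int) = p + 1) →
        cs.getD d [] = [L.getD d ' ']) :
    ∀ j : Nat, j < L.length →
      (P.foldl dewrapGo cs).getD j [] =
        if ((j : Int) ∈ P ∧ pvC L j = true) then [] else cs.getD j [] := by
  induction P generalizing cs with
  | nil => intro j hj; simp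
  | cons p rest ih =>
    obtain ⟨k, hpk, hklt⟩ := hP p (List.mem_cons_self)
    have hpair := List.pairwise_cons.mp hnd
    intro j hj
    have hcs' : ∀ q ∈ rest, ∀ d : Nat, d < L.length →
        ((d : Int) = q - 1 ∨ (d : Int) = q ∨ (d : Int) = q + 1) →
        (dewrapGo cs p).getD d [] = [L.getD d ' '] := by
      intro q hq d hd hdq
      obtain ⟨k', hqk, _⟩ := hP q (List.mem_cons_of_mem _ hq)
      have hlt : p < q := hpair.1 q hq
      rw [pv_go_getD_ne cs p d (by omega) (by omega)]
      exact hcs q (List.mem_cons_of_mem _ hq) d hd hdq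
    have IH := ih (dewrapGo cs p) (by rw [pv_length_go]; exact hlen)
      (fun q hq => hP q (List.mem_cons_of_mem _ hq)) hpair.2 hcs' j hj
    rw [List.foldl_cons, IH]
    by_cases hjp : (j : Int) = p
    · have hj40 : j = 40 * (k + 1) := by omega
      have hnotin : (j : Int) ∉ rest := fun hin => absurd (hpair.1 _ hin) (by omega)
      rw [if_neg (fun hand => hnotin hand.1)]
      have hself := pv_go_getD_self L cs k hlen hklt
        (fun d hd hcond => hcs p (List.mem_cons_self) d hd (by omega))
      subst hj40
      rw [hpk] at hjp ⊢
      simp only [List.mem_cons, true_or, true_and]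
      exact hself
    · rw [pv_go_getD_ne cs p j (by omega) hjp]
      simp only [List.mem_cons, hjp, false_or]

theorem pv_flatten_ite (l : List Nat) (c : Nat → Bool) (x : Nat → Char) :
    (l.map (fun j => if c j then ([] : List Char) else [x j])).flatten
      = l.filterMap (fun j => if c j then none else some (x j)) := by
  induction l with
  | nil => rfl
  | cons a t ih =>
      by_cases h : c a <;> simp [h, ih]

-- assembled characterisation of port A
theorem pv_A_char (text : String) (ht : ¬ text = "") :
    dewrap text = String.ofList ((List.range text.toList.length).filterMap
      (fun j => if pvC text.toList j then none else some (text.toList.getD j ' '))) := by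
  have hmap : ∀ d : Nat, d < text.toList.length →
      (text.toList.map (fun c => [c])).getD d [] = [text.toList.getD d ' '] := by
    intro d hd
    simp only [List.getD_eq_getElem?_getD, List.getElem?_map, List.getElem?_eq_getElem hd,
      Option.map_some, Option.getD_some]
  have hP : ∀ p ∈ PySem.List.pyRange 40 (text.toList.length : Int) 40,
      ∃ k : Nat, p = ((40 * (k + 1) : Nat) : Int) ∧ 40 * (k + 1) < text.toList.length := by
    intro p hp
    rw [PySem.List.mem_pyRange_iff_of_pos (by norm_num)] at hp
    obtain ⟨h1, h2, c, hc⟩ := hp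
    exact ⟨c.toNat, by omega, by omega⟩
  have hnd : (PySem.List.pyRange 40 (text.toList.length : Int) 40).Pairwise (· < ·) := by
    rw [PySem.List.pyRange_of_pos _ _ (by norm_num)]
    exact (List.pairwise_map).mpr (List.pairwise_lt_range.imp (by intro a b h; omega))
  have key := pv_foldA text.toList (PySem.List.pyRange 40 (text.toList.length : Int) 40)
    (text.toList.map (fun c => [c])) (List.length_map _) hP hnd
    (fun p _ d hd _ => hmap d hd)
  have hlistEq : (PySem.List.pyRange 40 (text.toList.length : Int) 40).foldl dewrapGo
      (text.toList.map (fun c => [c]))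
      = (List.range text.toList.length).map
          (fun j => if pvC text.toList j then ([] : List Char) else [text.toList.getD j ' ']) := by
    apply List.ext_getElem
    · rw [pv_length_foldA, List.length_map, List.length_map, List.length_range]
    · intro i hi1 hi2
      have hi : i < text.toList.length := by
        rw [pv_length_foldA, List.length_map] at hi1; exact hi1
      rw [← List.getD_eq_getElem _ [] hi1, key i hi]
      have hmemiff : ((i : Int) ∈ PySem.List.pyRange 40 (text.toList.length : Int) 40
          ∧ pvC text.toList i = true) ↔ pvC text.toList i = true := by
        constructor
        · exact fun h => h.2
        · intro h
          refine ⟨?_, h⟩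
          simp only [pvC, Bool.and_eq_true, decide_eq_true_eq, beq_iff_eq] at h
          rw [PySem.List.mem_pyRange_iff_of_pos (by norm_num)]
          refine ⟨by omega, by omega, by omega⟩
      rw [if_congr hmemiff rfl rfl]
      rw [List.getElem_map]
      simp only [List.getElem_range]
      split
      · rfl
      · rw [hmap i hi]
  unfold dewrap
  rw [if_neg ht]
  dsimp only
  rw [List.length_map, hlistEq, pv_flatten_ite]

-- B's loop condition at index s equals pvC
theorem pv_condB (L : List Char) (s : Nat) (hs : s < L.length) :
    ((decide ((s : Int) ≠ 0)) && (PySem.Int.mod (s : Int) 40 == 0) && (L.getD s ' ' == ' ')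
      && decide ((s : Int) + 1 < (L.length : Int))
      && PySem.Chars.isalpha (PySem.List.pyGetD L ((s : Int) - 1) ' ')
      && PySem.Chars.isalpha (PySem.List.pyGetD L ((s : Int) + 1) ' ')) = pvC L s := by
  unfold pvC
  by_cases hs0 : s = 0
  · subst hs0; simp
  · have e1 : ((s : Int) - 1) = ((s - 1 : Nat) : Int) := by omega
    have e2 : ((s : Int) + 1) = ((s + 1 : Nat) : Int) := by omega
    rw [e1, e2, PySem.List.pyGetD_natCast, PySem.List.pyGetD_natCast,
        PySem.Int.mod_eq_emod_of_pos (by norm_num : (0:Int) < 40)]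
    congr 1
    congr 1
    · congr 1
      · congr 1
        · congr 1
          · simp
          · apply Bool.eq_iff_iff.mpr
            simp only [beq_iff_eq, decide_eq_true_eq]
            omega
      · exact decide_eq_decide.mpr (by omega)

-- the invariant for B's fold
theorem pv_foldB (L : List Char) (M : List Char) (s : Nat) (acc : List Char)
    (hM : M = L.drop s) :
    (PySem.List.enumerate M (s : Int)).foldl
      (fun out ic =>
        if ic.1 ≠ 0 && PySem.Int.mod ic.1 40 == 0 && ic.2 == ' ' && decide (ic.1 + 1 < (L.length : Int))
            && PySem.Chars.isalpha (PySem.List.pyGetD L (ic.1 - 1) ' ')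
            && PySem.Chars.isalpha (PySem.List.pyGetD L (ic.1 + 1) ' ')
        then out else out ++ [ic.2]) acc
    = acc ++ (List.range M.length).filterMap
        (fun k => if pvC L (s + k) then none else some (L.getD (s + k) ' ')) := by
  induction M generalizing s acc with
  | nil => simp [PySem.List.enumerate]
  | cons c t ih =>
    have hs : s < L.length := by
      have := congrArg List.length hM
      simp [List.length_drop] at this
      omega
    have hc : L.getD s ' ' = c := by
      have h0 : (L.drop s)[0]? = L[s + 0]? := List.getElem?_drop
      rw [← hM] at h0
      simp at h0
      simp [List.getD_eq_getElem?_getD, ← h0]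
    have htl : t = L.drop (s + 1) := by
      have : L.drop (s + 1) = (L.drop s).drop 1 := by
        rw [List.drop_drop]
      rw [← hM] at this
      simpa using this.symm
    rw [show PySem.List.enumerate (c :: t) (s : Int) = ((s : Int), c) :: PySem.List.enumerate t ((s : Int) + 1)
        from by simp [PySem.List.enumerate], List.foldl_cons]
    dsimp only
    rw [← hc]
    rw [pv_condB L s hs]
    rw [show ((s : Int) + 1) = ((s + 1 : Nat) : Int) by omega]
    have hrange : List.range (t.length + 1) = 0 :: (List.range t.length).map (· + 1) := by
      rw [List.range_succ_eq_map]
    rw [List.length_cons, hrange, List.filterMap_cons, List.filterMap_map]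
    have harr : ((fun k => if pvC L (s + k) then none else some (L.getD (s + k) ' ')) ∘ (· + 1))
        = (fun k => if pvC L ((s + 1) + k) then none else some (L.getD ((s + 1) + k) ' ')) := by
      funext k
      simp only [Function.comp_apply]
      rw [show s + (k + 1) = (s + 1) + k by omega]
    rw [harr]
    by_cases hp : pvC L s = true
    · simp only [hp, Nat.add_zero, if_true]
      exact ih (s + 1) acc htl
    · simp only [Bool.eq_false_iff.mpr hp, Nat.add_zero, Bool.false_eq_true, if_false]
      rw [ih (s + 1) (acc ++ [L.getD s ' ']) htl, List.append_assoc]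
      rfl

theorem pv_B_char (text : String) :
    dewrap_alt text = String.ofList ((List.range text.toList.length).filterMap
      (fun j => if pvC text.toList j then none else some (text.toList.getD j ' '))) := by
  have h := pv_foldB text.toList text.toList 0 [] (by simp)
  simp only [Nat.cast_zero, Nat.zero_add, List.nil_append] at h
  unfold dewrap_alt
  dsimp only
  rw [h]

theorem dewrap_spec : Claim_equal_dewrap := by
  intro text _
  unfold Spec_dewrap
  by_cases ht : text = ""
  · subst ht; decide
  · rw [pv_A_char text ht, pv_B_char text]
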